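-- pv_equiv track=rewrite | github.com/nmartin15/mARB2.0- | tests/utils/https_test_utils.py | get_security_headers
-- ===== SOURCE A (Python) =====
-- def get_security_headers(response_headers: dict) -> dict:
--     """
--     Extract security headers from response headers.
--
--     Args:
--         response_headers: Dictionary of response headers
--
--     Returns:
--         Dictionary of security headers found
--     """
--     security_headers = {
--         "Strict-Transport-Security": None,
--         "X-Frame-Options": None,
--         "X-Content-Type-Options": None,
--         "X-XSS-Protection": None,
--         "Referrer-Policy": None,
--         "Content-Security-Policy": None,
--         "Permissions-Policy": None,
--     }
--
--     # Case-insensitive header lookup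
--     header_lower = {k.lower(): v for k, v in response_headers.items()}
--
--     for header_name in security_headers.keys():
--         header_key = header_name.lower()
--         if header_key in header_lower:
--             security_headers[header_name] = header_lower[header_key]
--
--     return security_headers
-- ===== SOURCE B (Python) =====
-- _SECURITY_HEADER_NAMES = [
--     "Strict-Transport-Security",
--     "X-Frame-Options",
--     "X-Content-Type-Options",
--     "X-XSS-Protection",
--     "Referrer-Policy",
--     "Content-Security-Policy",
--     "Permissions-Policy",
-- ]
--
--
-- def get_security_headers(response_headers: dict) -> dict:
--     """Extract security headers case-insensitively: single pass over the
--     input, guided by a lowercase->canonical reverse index."""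
--     reverse = {name.lower(): name for name in _SECURITY_HEADER_NAMES}
--     result = {name: None for name in _SECURITY_HEADER_NAMES}
--     for key, value in response_headers.items():
--         canonical = reverse.get(key.lower())
--         if canonical is not None:
--             result[canonical] = value
--     return result
-- ===== Notes on version B (the rewrite author's own statement) =====
-- stated objective: idiomatic
-- what changed: Instead of building a full lowercased copy of the input dict and then probing it once per target header, B builds a fixed lowercase->canonical reverse index over the 7 security-header names and makes a single pass over the input headers, writing each match into a pre-initialised result dict.
import Mathlib
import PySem

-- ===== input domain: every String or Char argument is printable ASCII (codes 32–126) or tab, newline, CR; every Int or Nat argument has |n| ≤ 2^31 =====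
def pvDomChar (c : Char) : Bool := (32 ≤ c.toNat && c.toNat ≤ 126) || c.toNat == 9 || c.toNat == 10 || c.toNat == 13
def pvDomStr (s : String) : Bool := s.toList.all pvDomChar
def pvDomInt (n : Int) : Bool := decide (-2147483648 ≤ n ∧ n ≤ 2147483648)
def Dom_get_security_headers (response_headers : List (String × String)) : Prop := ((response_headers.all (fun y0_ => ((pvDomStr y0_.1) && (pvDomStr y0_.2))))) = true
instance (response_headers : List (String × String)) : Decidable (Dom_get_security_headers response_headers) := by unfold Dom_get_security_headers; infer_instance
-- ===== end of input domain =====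

-- B changes the decomposition: a fixed lowercase->canonical reverse index and ONE pass over the
-- input headers, instead of A's full lowercased copy of the input probed once per target name.

-- ===== PORT A =====
-- the 7 security header names, in A's dict-literal order (shared literal of both Pythons)
def pvSecNames : List String :=
  ["Strict-Transport-Security", "X-Frame-Options", "X-Content-Type-Options",
   "X-XSS-Protection", "Referrer-Policy", "Content-Security-Policy", "Permissions-Policy"]

-- the dict literal { name: None for the 7 names } (appears in both Pythons)
def pvSecInit : PySem.Dict String (Option String) :=
  PySem.Dict.ofList (pvSecNames.map (fun n => (n, none)))

def get_security_headers (response_headers : List (String × String)) : List (String × Option String) :=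
  -- security_headers = { ...: None }
  let security_headers := pvSecInit
  -- header_lower = {k.lower(): v for k, v in response_headers.items()}
  let header_lower : PySem.Dict String String :=
    response_headers.foldl (fun d p => d.insert (PySem.Str.lower p.1) p.2) PySem.Dict.empty
  -- for header_name in security_headers.keys(): if header_key in header_lower: assign
  let final := security_headers.keys.foldl
    (fun s header_name =>
      let header_key := PySem.Str.lower header_name
      if header_lower.contains header_key then
        s.insert header_name (header_lower.get? header_key)  -- get? under the contains guard = header_lower[header_key]
      else s)
    security_headers
  final.items

-- ===== PORT B =====
-- reverse = {name.lower(): name for name in _SECURITY_HEADER_NAMES}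
def pvRev : PySem.Dict String String :=
  PySem.Dict.ofList (pvSecNames.map (fun n => (PySem.Str.lower n, n)))

def get_security_headers_alt (response_headers : List (String × String)) : List (String × Option String) :=
  let reverse := pvRev
  -- result = {name: None for name in _SECURITY_HEADER_NAMES}
  let result0 := pvSecInit
  -- for key, value in response_headers.items(): canonical = reverse.get(key.lower()); if not None: assign
  let result := response_headers.foldl
    (fun r p =>
      match reverse.get? (PySem.Str.lower p.1) with
      | some canonical => r.insert canonical (some p.2)
      | none => r)
    result0
  result.items

-- ===== PRECONDITION & SPEC =====
def Spec_get_security_headers (response_headers : List (String × String)) (out : List (String × Option String)) : Prop := out = get_security_headers_alt response_headers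
instance (response_headers : List (String × String)) (out : List (String × Option String)) : Decidable (Spec_get_security_headers response_headers out) := by unfold Spec_get_security_headers; infer_instance

-- ===== CLAIM (what is proved, stated in full; the proofs are below) =====
def Claim_equal_get_security_headers : Prop := ∀ (response_headers : List (String × String)), Dom_get_security_headers response_headers → Spec_get_security_headers response_headers (get_security_headers response_headers)

-- ===== LEMMAS AND PROOFS =====


-- pvRev sends exactly the lowercased canonical names to their canonical form
lemma pvRev_lower (c : String) (hc : c ∈ pvSecNames) :
    pvRev.get? (PySem.Str.lower c) = some c := by
  fin_cases hc <;> decide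

lemma pvRev_some_imp (s c : String) (h : pvRev.get? s = some c) :
    c ∈ pvSecNames ∧ s = PySem.Str.lower c := by
  have hrev : pvRev = PySem.Dict.mk
      [("strict-transport-security", "Strict-Transport-Security"),
       ("x-frame-options", "X-Frame-Options"),
       ("x-content-type-options", "X-Content-Type-Options"),
       ("x-xss-protection", "X-XSS-Protection"),
       ("referrer-policy", "Referrer-Policy"),
       ("content-security-policy", "Content-Security-Policy"),
       ("permissions-policy", "Permissions-Policy")] := by decide
  rw [hrev] at h
  simp only [PySem.Dict.get?_mk_cons, beq_iff_eq] at h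
  split_ifs at h with h1 h2 h3 h4 h5 h6 h7
  · obtain rfl := Option.some.inj h; exact ⟨by decide, by rw [← h1]; decide⟩
  · obtain rfl := Option.some.inj h; exact ⟨by decide, by rw [← h2]; decide⟩
  · obtain rfl := Option.some.inj h; exact ⟨by decide, by rw [← h3]; decide⟩
  · obtain rfl := Option.some.inj h; exact ⟨by decide, by rw [← h4]; decide⟩
  · obtain rfl := Option.some.inj h; exact ⟨by decide, by rw [← h5]; decide⟩
  · obtain rfl := Option.some.inj h; exact ⟨by decide, by rw [← h6]; decide⟩
  · obtain rfl := Option.some.inj h; exact ⟨by decide, by rw [← h7]; decide⟩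
  · have hnone : ({ items := [] } : PySem.Dict String String).get? s = none := rfl
    rw [hnone] at h
    cases h

-- get? through the header_lower-building fold is a last-wins scan of the list
lemma hl_get (l : List (String × String)) (d : PySem.Dict String String) (k : String) :
    (l.foldl (fun d p => d.insert (PySem.Str.lower p.1) p.2) d).get? k
      = l.foldl (fun acc p => if PySem.Str.lower p.1 = k then some p.2 else acc) (d.get? k) := by
  induction l generalizing d with
  | nil => rfl
  | cons p t ih =>
      simp only [List.foldl_cons, ih]
      congr 1
      rw [PySem.Dict.get?_insert]
      by_cases h : PySem.Str.lower p.1 = k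
      · rw [if_pos h.symm, if_pos h]
      · rw [if_neg (fun he => h he.symm), if_neg h]

-- a guarded-insert fold over keys the dict already contains does not change the key list
lemma keys_fold_guarded (l : List String) (cond : String → Bool)
    (v : String → Option String) (s : PySem.Dict String (Option String))
    (h : ∀ n ∈ l, s.contains n = true) :
    (l.foldl (fun s n => if cond n then s.insert n (v n) else s) s).keys = s.keys := by
  induction l generalizing s with
  | nil => rfl
  | cons m t ih =>
      simp only [List.foldl_cons]
      by_cases hm : cond m
      · rw [if_pos hm,
          ih _ (fun n hn => by
            rw [PySem.Dict.contains_insert]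
            simp [h n (List.mem_cons_of_mem _ hn)]),
          PySem.Dict.keys_insert_of_contains _ _ (h m (List.mem_cons_self ..))]
      · rw [if_neg hm]
        exact ih _ (fun n hn => h n (List.mem_cons_of_mem _ hn))

-- a fold that never touches key n leaves getD at n unchanged
lemma getD_fold_untouched (l : List String) (cond : String → Bool)
    (v : String → Option String) (s : PySem.Dict String (Option String))
    (n : String) (hn : n ∉ l) :
    (l.foldl (fun s m => if cond m then s.insert m (v m) else s) s).getD n none
      = s.getD n none := by
  induction l generalizing s with
  | nil => rfl
  | cons m t ih =>
      simp only [List.foldl_cons]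
      rw [ih _ (fun h => hn (List.mem_cons_of_mem _ h))]
      by_cases hm : cond m
      · rw [if_pos hm, PySem.Dict.getD_insert,
          if_neg (fun h => hn (by rw [h]; exact List.mem_cons_self ..))]
      · rw [if_neg hm]

-- value of A's canonical-name loop at a name n that occurs exactly once in l
lemma getD_fold_guarded (l : List String) (cond : String → Bool)
    (v : String → Option String) (s : PySem.Dict String (Option String))
    (n : String) (hn : n ∈ l) (hnd : l.Nodup) :
    (l.foldl (fun s m => if cond m then s.insert m (v m) else s) s).getD n none
      = if cond n then v n else s.getD n none := by
  induction l generalizing s with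
  | nil => cases hn
  | cons m t ih =>
      simp only [List.foldl_cons]
      obtain ⟨hm1, hm2⟩ := List.nodup_cons.mp hnd
      rcases List.mem_cons.mp hn with rfl | hmem
      · rw [getD_fold_untouched _ _ _ _ _ hm1]
        by_cases hc : cond n
        · rw [if_pos hc, if_pos hc, PySem.Dict.getD_insert, if_pos rfl]
        · rw [if_neg hc, if_neg hc]
      · have hnm : n ≠ m := fun he => hm1 (he ▸ hmem)
        rw [ih _ hmem hm2]
        by_cases hc : cond m
        · rw [if_pos hc, PySem.Dict.getD_insert, if_neg hnm]
        · rw [if_neg hc]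

-- getD through B's single pass is the same last-wins scan
lemma b_getD (l : List (String × String)) (r : PySem.Dict String (Option String)) (n : String) :
    (l.foldl (fun r p =>
        match pvRev.get? (PySem.Str.lower p.1) with
        | some canonical => r.insert canonical (some p.2)
        | none => r) r).getD n none
      = l.foldl (fun acc p =>
          match pvRev.get? (PySem.Str.lower p.1) with
          | some canonical => if n = canonical then some p.2 else acc
          | none => acc) (r.getD n none) := by
  induction l generalizing r with
  | nil => rfl
  | cons p t ih =>
      simp only [List.foldl_cons, ih]
      congr 1
      cases hc : pvRev.get? (PySem.Str.lower p.1) with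
      | none => rfl
      | some canonical => simp only [PySem.Dict.getD_insert]

-- B's keys stay the canonical names throughout the pass
lemma b_keys (l : List (String × String)) (r : PySem.Dict String (Option String))
    (h : r.keys = pvSecNames) :
    (l.foldl (fun r p =>
        match pvRev.get? (PySem.Str.lower p.1) with
        | some canonical => r.insert canonical (some p.2)
        | none => r) r).keys = pvSecNames := by
  induction l generalizing r with
  | nil => exact h
  | cons p t ih =>
      simp only [List.foldl_cons]
      cases hc : pvRev.get? (PySem.Str.lower p.1) with
      | none => exact ih _ h
      | some canonical =>
          have hcont : r.contains canonical = true := by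
            rw [PySem.Dict.contains_iff_mem_keys, h]
            exact (pvRev_some_imp _ _ hc).1
          exact ih _ (by rw [PySem.Dict.keys_insert_of_contains _ _ hcont, h])

-- for a canonical name n, the two per-element conditions agree
lemma step_eq (n : String) (hn : n ∈ pvSecNames) (acc : Option String) (p : String × String) :
    (match pvRev.get? (PySem.Str.lower p.1) with
      | some canonical => if n = canonical then some p.2 else acc
      | none => acc)
    = if PySem.Str.lower p.1 = PySem.Str.lower n then some p.2 else acc := by
  by_cases h : PySem.Str.lower p.1 = PySem.Str.lower n
  · rw [h, pvRev_lower n hn]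
    show (if n = n then some p.2 else acc) = _
    rw [if_pos rfl, if_pos rfl]
  · cases hc : pvRev.get? (PySem.Str.lower p.1) with
    | none => rw [if_neg h]
    | some canonical =>
        show (if n = canonical then some p.2 else acc) = _
        have hs := pvRev_some_imp _ _ hc
        have hne : n ≠ canonical :=
          fun he => h (hs.2.trans (congrArg PySem.Str.lower he.symm))
        rw [if_neg hne, if_neg h]

theorem get_security_headers_spec : Claim_equal_get_security_headers := by
  intro rh _
  unfold Spec_get_security_headers get_security_headers get_security_headers_alt
  have hkeys0 : pvSecInit.keys = pvSecNames := by decide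
  have hnd : pvSecNames.Nodup := by decide
  set hl : PySem.Dict String String :=
    rh.foldl (fun d p => d.insert (PySem.Str.lower p.1) p.2) PySem.Dict.empty with hhl
  set finA := pvSecInit.keys.foldl (fun s header_name =>
      if hl.contains (PySem.Str.lower header_name) then
        s.insert header_name (hl.get? (PySem.Str.lower header_name)) else s) pvSecInit with hfinA
  set finB := rh.foldl (fun r p =>
      match pvRev.get? (PySem.Str.lower p.1) with
      | some canonical => r.insert canonical (some p.2)
      | none => r) pvSecInit with hfinB
  have hkA : finA.keys = pvSecNames := by
    rw [hfinA, keys_fold_guarded _ _ _ _ (fun n hn => by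
      rw [PySem.Dict.contains_iff_mem_keys, hkeys0]
      exact hkeys0 ▸ hn), hkeys0]
  have hkB : finB.keys = pvSecNames := b_keys _ _ hkeys0
  rw [PySem.Dict.items_eq_map_keys finA (by rw [hkA]; exact hnd) none,
      PySem.Dict.items_eq_map_keys finB (by rw [hkB]; exact hnd) none, hkA, hkB]
  apply List.map_congr_left
  intro n hn
  have hinit : pvSecInit.getD n none = none := by fin_cases hn <;> decide
  have hA : finA.getD n none = hl.get? (PySem.Str.lower n) := by
    rw [hfinA, hkeys0, getD_fold_guarded _ _ _ _ _ hn hnd, hinit]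
    by_cases hc : hl.contains (PySem.Str.lower n) = true
    · rw [if_pos hc]
    · rw [if_neg hc]
      rw [(PySem.Dict.get?_eq_none_iff_contains hl _).mpr (by simpa using hc)]
  have hB : finB.getD n none
      = rh.foldl (fun acc p =>
          if PySem.Str.lower p.1 = PySem.Str.lower n then some p.2 else acc) none := by
    rw [hfinB, b_getD, hinit]
    exact PySem.List.foldl_congr_mem _ _ _ _ (fun acc p _ => step_eq n hn acc p)
  simp only [hA, hB, hhl, hl_get, PySem.Dict.get?_empty]

-- ===== VERDICT (by name: the statement is the Claim_ definition above) =====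
-- (proved above)
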